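-- pv_equiv track=rewrite | github.com/haslamdb/biogpu | tests/debug_real_data_kmers.py | extract_kmers_encoded
-- ===== SOURCE A (Python) =====
-- KMER_LENGTH = 15
--
-- BASE_A = 0
--
-- BASE_C = 1
--
-- BASE_G = 2
--
-- BASE_T = 3
--
-- BASE_N = 4
--
-- def encode_base(base):
--     """Encode base to 2-bit representation"""
--     base = base.upper()
--     if base == 'A': return BASE_A
--     elif base == 'C': return BASE_C
--     elif base == 'G': return BASE_G
--     elif base == 'T': return BASE_T
--     else: return BASE_N
--
-- def encode_kmer(seq):
--     """Encode k-mer string to 64-bit integer"""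
--     if len(seq) != KMER_LENGTH:
--         return None
--
--     kmer = 0
--     for base in seq:
--         encoded = encode_base(base)
--         if encoded == BASE_N:
--             return None  # Invalid k-mer
--         kmer = (kmer << 2) | encoded
--     return kmer
--
-- def extract_kmers_encoded(sequence):
--     """Extract all k-mers from sequence as encoded integers"""
--     kmers = set()
--     for i in range(len(sequence) - KMER_LENGTH + 1):
--         kmer_str = sequence[i:i+KMER_LENGTH].upper()
--         encoded = encode_kmer(kmer_str)
--         if encoded is not None:
--             kmers.add(encoded)
--     return kmers
-- ===== SOURCE B (Python) =====
-- KMER_LENGTH = 15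
--
-- _CODE = {'A': 0, 'C': 1, 'G': 2, 'T': 3}
-- _MOD = 1 << (2 * KMER_LENGTH)
--
--
-- def extract_kmers_encoded(sequence):
--     """Extract all k-mers from sequence as encoded integers (rolling encoding, one pass)."""
--     kmers = set()
--     val = 0
--     run = 0
--     for ch in sequence:
--         code = _CODE.get(ch.upper())
--         if code is None:
--             val = 0
--             run = 0
--         else:
--             val = (val * 4 + code) % _MOD
--             run += 1
--             if run >= KMER_LENGTH:
--                 kmers.add(val)
--     return kmers
-- ===== Notes on version B (the rewrite author's own statement) =====
-- stated objective: faster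
-- what changed: Replaces per-window slicing and re-encoding (each 15-mer encoded from scratch) with a single rolling pass that updates the 2-bit encoding incrementally (shift/mask as modular arithmetic) and tracks the length of the current run of valid bases.
import Mathlib
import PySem

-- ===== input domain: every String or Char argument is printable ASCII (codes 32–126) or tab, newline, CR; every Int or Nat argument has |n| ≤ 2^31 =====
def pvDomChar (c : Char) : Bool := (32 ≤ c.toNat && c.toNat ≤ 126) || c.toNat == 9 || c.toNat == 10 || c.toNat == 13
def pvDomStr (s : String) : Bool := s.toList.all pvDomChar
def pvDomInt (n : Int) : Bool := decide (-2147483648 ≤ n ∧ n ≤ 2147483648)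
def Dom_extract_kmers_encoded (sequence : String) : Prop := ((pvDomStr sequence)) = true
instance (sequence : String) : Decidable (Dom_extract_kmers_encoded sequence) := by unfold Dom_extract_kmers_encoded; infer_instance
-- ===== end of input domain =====

-- B replaces A's per-window slice-and-re-encode (O(n*k)) with one rolling pass that updates the
-- 2-bit encoding incrementally and tracks the current run of valid bases (O(n)).

-- ===== PORT A =====
def KMER_LENGTH : Int := 15

-- base.upper() on a one-character string = PySem.Chars.upperChar
def encode_base (base : Char) : Int :=
  let b := PySem.Chars.upperChar base
  if b = 'A' then 0
  else if b = 'C' then 1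
  else if b = 'G' then 2
  else if b = 'T' then 3
  else 4

-- the 'for base in seq' loop of encode_kmer, with its early 'return None';
-- (kmer << 2) | encoded ported exactly as shift/bor on Int
def encode_kmer_loop (seq : List Char) (kmer : Int) : Option Int :=
  match seq with
  | [] => some kmer
  | base :: rest =>
    let encoded := encode_base base
    if encoded = 4 then none
    else encode_kmer_loop rest (PySem.Int.bor (kmer <<< (2 : Nat)) encoded)

def encode_kmer (seq : List Char) : Option Int :=
  if (seq.length : Int) ≠ KMER_LENGTH then none
  else encode_kmer_loop seq 0

def extract_kmers_encoded (sequence : String) : List Int :=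
  let cs := sequence.toList
  (PySem.List.pyRange 0 ((cs.length : Int) - KMER_LENGTH + 1) 1).foldl
    (fun kmers i =>
      let kmer_str := PySem.Chars.upper (PySem.List.slice cs (some i) (some (i + KMER_LENGTH)))
      match encode_kmer kmer_str with
      | some encoded => PySem.Set.add kmers encoded
      | none => kmers)
    PySem.Set.empty

-- ===== PORT B =====
-- _MOD = 1 << (2 * KMER_LENGTH)
def pvMOD : Int := (1 : Int) <<< (30 : Nat)

-- _CODE.get(c): lookup in the literal four-entry dict
def pvCode? (c : Char) : Option Int :=
  if c = 'A' then some 0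
  else if c = 'C' then some 1
  else if c = 'G' then some 2
  else if c = 'T' then some 3
  else none

-- one iteration of B's 'for ch in sequence' loop; state = (kmers, val, run)
def altStep (st : List Int × Int × Int) (ch : Char) : List Int × Int × Int :=
  match pvCode? (PySem.Chars.upperChar ch) with
  | none => (st.1, 0, 0)
  | some code =>
    let val := PySem.Int.mod (st.2.1 * 4 + code) pvMOD
    let run := st.2.2 + 1
    if (15 : Int) ≤ run then (PySem.Set.add st.1 val, val, run) else (st.1, val, run)

def extract_kmers_encoded_alt (sequence : String) : List Int :=
  (sequence.toList.foldl altStep (PySem.Set.empty, 0, 0)).1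

-- ===== PRECONDITION & SPEC =====
def Spec_extract_kmers_encoded (sequence : String) (out : List Int) : Prop := out = extract_kmers_encoded_alt sequence
instance (sequence : String) (out : List Int) : Decidable (Spec_extract_kmers_encoded sequence out) := by unfold Spec_extract_kmers_encoded; infer_instance

-- ===== CLAIM (what is proved, stated in full; the proofs are below) =====
def Claim_equal_extract_kmers_encoded : Prop := ∀ (sequence : String), Dom_extract_kmers_encoded sequence → Spec_extract_kmers_encoded sequence (extract_kmers_encoded sequence)

-- ===== LEMMAS AND PROOFS =====

-- proof-side vocabulary ----------------------------------------------------
def goodB (c : Char) : Bool := (pvCode? (PySem.Chars.upperChar c)).isSome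
def codeD (c : Char) : Int := (pvCode? (PySem.Chars.upperChar c)).getD 0
def encAcc (k : Int) (l : List Char) : Int := l.foldl (fun v c => v * 4 + codeD c) k
-- maximal all-good suffix
def gsuf (cs : List Char) : List Char := (cs.reverse.takeWhile goodB).reverse
-- A's fold on the char list
def aFold (cs : List Char) : List Int :=
  (PySem.List.pyRange 0 ((cs.length : Int) - KMER_LENGTH + 1) 1).foldl
    (fun kmers i =>
      let kmer_str := PySem.Chars.upper (PySem.List.slice cs (some i) (some (i + KMER_LENGTH)))
      match encode_kmer kmer_str with
      | some encoded => PySem.Set.add kmers encoded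
      | none => kmers)
    PySem.Set.empty

theorem aFold_eq (s : String) : extract_kmers_encoded s = aFold s.toList := rfl

theorem up_idem (c : Char) : PySem.Chars.upperChar (PySem.Chars.upperChar c) = PySem.Chars.upperChar c := by
  simp only [PySem.Chars.upperChar, PySem.Chars.islower]
  split_ifs with h1 h2
  · exfalso
    have e1 : ('a' : Char).val.toNat = 97 := by decide
    have e2 : ('z' : Char).val.toNat = 122 := by decide
    simp only [Bool.and_eq_true, decide_eq_true_eq, Char.le_def, UInt32.le_iff_toNat_le, e1, e2] at h1 h2
    obtain ⟨ha, hb⟩ := h1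
    have hvalid : Nat.isValidChar (c.toNat - 32) := by
      left; simp only [Char.toNat]; omega
    have htn : (Char.ofNat (c.toNat - 32)).toNat = c.toNat - 32 := by
      rw [Char.toNat_ofNat, if_pos hvalid]
    obtain ⟨ha2, hb2⟩ := h2
    simp only [Char.toNat] at htn ha2 hb2
    omega
  · rfl
  · rfl

theorem encode_base_eq (c : Char) :
    encode_base (PySem.Chars.upperChar c) = if goodB c then codeD c else 4 := by
  simp only [encode_base, goodB, codeD, pvCode?, up_idem]
  split_ifs <;> simp_all

theorem codeD_bounds (c : Char) : 0 ≤ codeD c ∧ codeD c < 4 := by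
  simp only [codeD, pvCode?]
  split_ifs <;> simp

theorem bor_shift (k e : Int) (hk : 0 ≤ k) (he : 0 ≤ e) (he4 : e < 4) :
    PySem.Int.bor (k <<< (2 : Nat)) e = k * 4 + e := by
  have h2 : k <<< (2 : Nat) = k * 4 := by rw [Int.shiftLeft_eq]; ring
  have hk4 : (0:Int) ≤ k * 4 := by omega
  have hkn : (k * 4).toNat = k.toNat <<< 2 := by rw [Nat.shiftLeft_eq]; omega
  have hb : e.toNat < 4 := by omega
  rw [h2, PySem.Int.bor_of_nonneg hk4 he, hkn,
    ← Nat.shiftLeft_add_eq_or_of_lt hb, Nat.shiftLeft_eq]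
  push_cast
  omega

theorem encAcc_nonneg (k : Int) (l : List Char) (hk : 0 ≤ k) : 0 ≤ encAcc k l := by
  induction l generalizing k with
  | nil => simpa [encAcc] using hk
  | cons c l ih =>
    have hc := codeD_bounds c
    simp only [encAcc, List.foldl_cons] at ih ⊢
    exact ih _ (by omega)

theorem encode_kmer_loop_char (l : List Char) (k : Int) (hk : 0 ≤ k) :
    encode_kmer_loop (PySem.Chars.upper l) k =
      if l.all goodB then some (encAcc k l) else none := by
  induction l generalizing k with
  | nil => simp [PySem.Chars.upper, encode_kmer_loop, encAcc]
  | cons c l ih =>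
    have hc := codeD_bounds c
    simp only [PySem.Chars.upper, List.map_cons, encode_kmer_loop, encode_base_eq]
    by_cases hg : goodB c
    · rw [if_pos hg, if_neg (by omega), bor_shift k (codeD c) hk hc.1 hc.2]
      have := ih (k * 4 + codeD c) (by omega)
      simp only [PySem.Chars.upper] at this
      rw [this]
      simp [encAcc, hg]
    · rw [if_neg hg, if_pos rfl]
      simp [hg]

theorem encode_kmer_char (l : List Char) (h : l.length = 15) :
    encode_kmer (PySem.Chars.upper l) = if l.all goodB then some (encAcc 0 l) else none := by
  have hl : (PySem.Chars.upper l).length = 15 := by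
    simp [PySem.Chars.upper, h]
  simp only [encode_kmer, hl, KMER_LENGTH]
  rw [if_neg (by norm_num)]
  exact encode_kmer_loop_char l 0 le_rfl


theorem gsuf_concat_good (cs : List Char) (c : Char) (h : goodB c = true) :
    gsuf (cs ++ [c]) = gsuf cs ++ [c] := by
  simp [gsuf, h]

theorem gsuf_concat_bad (cs : List Char) (c : Char) (h : ¬ goodB c = true) :
    gsuf (cs ++ [c]) = [] := by
  simp [gsuf, h]

theorem gsuf_suffix (cs : List Char) : gsuf cs <:+ cs := by
  have h := List.takeWhile_prefix (l := cs.reverse) goodB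
  rw [gsuf, ← List.reverse_prefix]
  simpa using h

theorem gsuf_all (cs : List Char) : ∀ c ∈ gsuf cs, goodB c = true := by
  intro c hc
  rw [gsuf, List.mem_reverse] at hc
  exact List.mem_takeWhile_imp hc

theorem takeWhile_len_ge {α : Type} (p : α → Bool) (r : List α) (k : Nat) :
    k ≤ (r.takeWhile p).length ↔ k ≤ r.length ∧ (r.take k).all p = true := by
  induction r generalizing k with
  | nil => simp
  | cons a r ih =>
    cases k with
    | zero => simp
    | succ k =>
      by_cases hp : p a
      · simp [hp, ih]
      · simp [hp]

theorem encAcc_append (k : Int) (a b : List Char) : encAcc k (a ++ b) = encAcc (encAcc k a) b := by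
  simp [encAcc, List.foldl_append]

theorem encAcc_concat (k : Int) (l : List Char) (c : Char) :
    encAcc k (l ++ [c]) = encAcc k l * 4 + codeD c := by
  simp [encAcc, List.foldl_append]

theorem encAcc_shift (k : Int) (w : List Char) :
    encAcc k w = k * 4 ^ w.length + encAcc 0 w := by
  induction w generalizing k with
  | nil => simp [encAcc]
  | cons c w ih =>
    simp only [encAcc, List.foldl_cons] at *
    rw [ih (k * 4 + codeD c), ih (0 * 4 + codeD c)]
    simp only [List.length_cons]
    ring

theorem encAcc_lt (w : List Char) : encAcc 0 w < 4 ^ w.length := by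
  induction w using List.reverseRecOn with
  | nil => simp [encAcc]
  | append_singleton w c ih =>
    rw [encAcc_concat]
    have hc := codeD_bounds c
    simp only [List.length_append, List.length_cons, List.length_nil, pow_succ]
    have h4 : (0:Int) < 4 ^ w.length := by positivity
    nlinarith [ih, hc.1, hc.2]

theorem pvMOD_eq : pvMOD = 1073741824 := by
  decide

def aBody (cs : List Char) (kmers : List Int) (j : Nat) : List Int :=
  match encode_kmer (PySem.Chars.upper ((cs.drop j).take 15)) with
  | some e => PySem.Set.add kmers e
  | none => kmers

theorem range_eq (n : Nat) :
    PySem.List.pyRange 0 ((n : Int) - 15 + 1) 1 = List.map (fun (j : Nat) => (j : Int)) (List.range (n - 14)) := by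
  by_cases h : 14 ≤ n
  · have he : (n : Int) - 15 + 1 = ((n - 14 : Nat) : Int) := by push_cast [h]; omega
    rw [he, PySem.List.pyRange_zero_natCast]
  · have h0 : n - 14 = 0 := by omega
    rw [h0]
    simp only [List.range_zero, List.map_nil]
    apply List.eq_nil_iff_forall_not_mem.mpr
    intro i hi
    have := (PySem.List.mem_pyRange_one).mp hi
    omega

theorem aFold_range (cs : List Char) :
    aFold cs = (List.range (cs.length - 14)).foldl (aBody cs) PySem.Set.empty := by
  unfold aFold KMER_LENGTH
  rw [range_eq, List.foldl_map]
  apply PySem.List.foldl_congr_mem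
  intro acc j hj
  have h15 : ((j : Int) + 15) = ((j : Int) + ((15 : Nat) : Int)) := by norm_num
  rw [h15, PySem.List.slice_natCast_add]
  rfl

theorem aFold_concat (cs : List Char) (c : Char) :
    aFold (cs ++ [c]) =
      if 15 ≤ cs.length + 1 then
        (if ((cs ++ [c]).drop (cs.length + 1 - 15)).all goodB
         then PySem.Set.add (aFold cs) (encAcc 0 ((cs ++ [c]).drop (cs.length + 1 - 15)))
         else aFold cs)
      else aFold cs := by
  rw [aFold_range, aFold_range]
  simp only [List.length_append, List.length_cons, List.length_nil]
  by_cases h : 15 ≤ cs.length + 1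
  · rw [if_pos h]
    have hr : cs.length + 1 - 14 = (cs.length - 14) + 1 := by omega
    rw [hr, List.range_succ, List.foldl_append]
    have hcong : (List.range (cs.length - 14)).foldl (aBody (cs ++ [c])) PySem.Set.empty
        = (List.range (cs.length - 14)).foldl (aBody cs) PySem.Set.empty := by
      apply PySem.List.foldl_congr_mem
      intro acc j hj
      have hj' : j < cs.length - 14 := List.mem_range.mp hj
      unfold aBody
      rw [List.drop_append_of_le_length (by omega),
        List.take_append_of_le_length (by simp only [List.length_drop]; omega)]
    rw [hcong]
    simp only [List.foldl_cons, List.foldl_nil]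
    unfold aBody
    have hidx : cs.length - 14 = cs.length + 1 - 15 := by omega
    have hlen : ((cs ++ [c]).drop (cs.length + 1 - 15)).length = 15 := by
      simp only [List.length_drop, List.length_append, List.length_cons, List.length_nil]
      omega
    rw [hidx, List.take_of_length_le (le_of_eq hlen), encode_kmer_char _ hlen]
    by_cases hw : ((cs ++ [c]).drop (cs.length + 1 - 15)).all goodB = true
    · rw [if_pos hw, if_pos hw]
    · rw [if_neg hw, if_neg hw]
  · rw [if_neg h]
    have h1 : cs.length + 1 - 14 = 0 := by omega
    have h2 : cs.length - 14 = 0 := by omega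
    rw [h1, h2]
    rfl

theorem good_window_iff (cs : List Char) (c : Char) :
    (15 ≤ (gsuf (cs ++ [c])).length) ↔
      (15 ≤ cs.length + 1 ∧ ((cs ++ [c]).drop (cs.length + 1 - 15)).all goodB = true) := by
  have hlen : (cs ++ [c]).length = cs.length + 1 := by simp
  constructor
  · intro h15
    obtain ⟨pre, hpre⟩ := gsuf_suffix (cs ++ [c])
    have hplen : pre.length + (gsuf (cs ++ [c])).length = cs.length + 1 := by
      have := congrArg List.length hpre
      simpa using this
    refine ⟨by omega, ?_⟩
    have hdrop : (cs ++ [c]).drop (cs.length + 1 - 15)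
        = (gsuf (cs ++ [c])).drop ((gsuf (cs ++ [c])).length - 15) := by
      conv_lhs => rw [← hpre]
      rw [List.drop_append, List.drop_eq_nil_of_le (by omega), List.nil_append]
      congr 1
      omega
    rw [hdrop]
    apply List.all_eq_true.mpr
    intro x hx
    exact gsuf_all _ x (List.mem_of_mem_drop hx)
  · rintro ⟨hm, hall⟩
    have hlg : (gsuf (cs ++ [c])).length = ((cs ++ [c]).reverse.takeWhile goodB).length := by
      simp [gsuf]
    rw [hlg, takeWhile_len_ge]
    refine ⟨by simp; omega, ?_⟩
    have htake : (cs ++ [c]).reverse.take 15 = ((cs ++ [c]).drop (cs.length + 1 - 15)).reverse := by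
      rw [List.reverse_drop]
      congr 1
      simp
      omega
    rw [htake]
    simpa using hall

theorem window_val (cs' : List Char) (h15 : 15 ≤ (gsuf cs').length) :
    PySem.Int.mod (encAcc 0 (gsuf cs')) pvMOD = encAcc 0 (cs'.drop (cs'.length - 15)) := by
  obtain ⟨pre, hpre⟩ := gsuf_suffix cs'
  set g := gsuf cs' with hgdef
  have hlens : pre.length + g.length = cs'.length := by
    have := congrArg List.length hpre
    simpa using this
  have hw : cs'.drop (cs'.length - 15) = g.drop (g.length - 15) := by
    rw [← hpre, List.length_append, List.drop_append, List.drop_eq_nil_of_le (by omega),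
      List.nil_append]
    congr 1
    omega
  rw [hw]
  have hsplit : g = (g).take ((g).length - 15)
      ++ (g).drop ((g).length - 15) := (List.take_append_drop _ _).symm
  conv_lhs => rw [hsplit]
  rw [encAcc_append, encAcc_shift]
  have hwl : ((g).drop ((g).length - 15)).length = 15 := by
    simp only [List.length_drop]
    omega
  rw [hwl]
  have h0 : 0 ≤ encAcc 0 ((g).drop ((g).length - 15)) := encAcc_nonneg 0 _ le_rfl
  have hlt : encAcc 0 ((g).drop ((g).length - 15)) < 4 ^ 15 := by
    have := encAcc_lt ((g).drop ((g).length - 15))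
    rwa [hwl] at this
  rw [pvMOD_eq, PySem.Int.mod_eq_emod_of_pos (by norm_num)]
  have h415 : (4:Int) ^ 15 = 1073741824 := by norm_num
  rw [h415] at hlt ⊢
  omega

theorem main_inv (cs : List Char) :
    cs.foldl altStep (PySem.Set.empty, 0, 0) =
      (aFold cs, PySem.Int.mod (encAcc 0 (gsuf cs)) pvMOD, ((gsuf cs).length : Int)) := by
  induction cs using List.reverseRecOn with
  | nil =>
    have h1 : aFold ([] : List Char) = PySem.Set.empty := by rw [aFold_range]; rfl
    have h2 : PySem.Int.mod (encAcc 0 ([] : List Char)) pvMOD = 0 := by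
      rw [pvMOD_eq]; decide
    simp [h1, h2, gsuf]
  | append_singleton cs c ih =>
    rw [List.foldl_append, ih]
    simp only [List.foldl_cons, List.foldl_nil]
    by_cases hg : goodB c = true
    · obtain ⟨code, hcode⟩ : ∃ v, pvCode? (PySem.Chars.upperChar c) = some v := by
        rw [goodB] at hg
        exact Option.isSome_iff_exists.mp hg
      have hcd : codeD c = code := by rw [codeD, hcode]; rfl
      simp only [altStep, hcode]
      have hval : PySem.Int.mod (PySem.Int.mod (encAcc 0 (gsuf cs)) pvMOD * 4 + code) pvMOD
          = PySem.Int.mod (encAcc 0 (gsuf (cs ++ [c]))) pvMOD := by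
        rw [gsuf_concat_good cs c hg, encAcc_concat, ← hcd, pvMOD_eq,
          PySem.Int.mod_eq_emod_of_pos (by norm_num), PySem.Int.mod_eq_emod_of_pos (by norm_num),
          PySem.Int.mod_eq_emod_of_pos (by norm_num)]
        omega
      have hglen : (gsuf (cs ++ [c])).length = (gsuf cs).length + 1 := by
        rw [gsuf_concat_good cs c hg]
        simp
      rw [aFold_concat]
      by_cases hn : 15 ≤ (gsuf cs).length + 1
      · have h15 : 15 ≤ (gsuf (cs ++ [c])).length := by omega
        obtain ⟨hm, hall⟩ := (good_window_iff cs c).mp h15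
        have hwin := window_val (cs ++ [c]) h15
        have hwlen : (cs ++ [c]).length - 15 = cs.length + 1 - 15 := by simp
        rw [hwlen] at hwin
        rw [if_pos (by omega), if_pos hm, if_pos hall]
        refine Prod.ext ?_ (Prod.ext ?_ ?_)
        · simp only []
          rw [hval, hwin]
        · simp only []
          rw [hval]
        · simp only [hglen]
          push_cast
          ring
      · have h15 : ¬ 15 ≤ (gsuf (cs ++ [c])).length := by omega
        have hA : (if 15 ≤ cs.length + 1 then
              (if ((cs ++ [c]).drop (cs.length + 1 - 15)).all goodB
               then PySem.Set.add (aFold cs) (encAcc 0 ((cs ++ [c]).drop (cs.length + 1 - 15)))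
               else aFold cs)
            else aFold cs) = aFold cs := by
          by_cases hm : 15 ≤ cs.length + 1
          · rw [if_pos hm]
            have hwall : ¬ ((cs ++ [c]).drop (cs.length + 1 - 15)).all goodB = true := by
              intro hall
              exact h15 ((good_window_iff cs c).mpr ⟨hm, hall⟩)
            rw [if_neg hwall]
          · rw [if_neg hm]
        rw [hA, if_neg (by omega)]
        refine Prod.ext rfl (Prod.ext ?_ ?_)
        · simp only []
          rw [hval]
        · simp only [hglen]
          push_cast
          ring
    · have hcode : pvCode? (PySem.Chars.upperChar c) = none := by
        rw [goodB] at hg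
        exact Option.not_isSome_iff_eq_none.mp hg
      simp only [altStep, hcode]
      rw [gsuf_concat_bad cs c hg]
      have hA : aFold (cs ++ [c]) = aFold cs := by
        rw [aFold_concat]
        by_cases hm : 15 ≤ cs.length + 1
        · rw [if_pos hm]
          have hwall : ¬ ((cs ++ [c]).drop (cs.length + 1 - 15)).all goodB = true := by
            intro hall
            have hc : c ∈ (cs ++ [c]).drop (cs.length + 1 - 15) := by
              rw [List.drop_append_of_le_length (by omega)]
              exact List.mem_append_right _ (List.mem_singleton.mpr rfl)
            exact hg (List.all_eq_true.mp hall c hc)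
          rw [if_neg hwall]
        · rw [if_neg hm]
      have h2 : PySem.Int.mod (encAcc 0 ([] : List Char)) pvMOD = 0 := by
        rw [pvMOD_eq]; decide
      rw [hA, h2]
      rfl

-- ===== VERDICT (by name: the statement is the Claim_ definition above) =====
theorem extract_kmers_encoded_spec : Claim_equal_extract_kmers_encoded := by
  intro s _hd
  unfold Spec_extract_kmers_encoded
  rw [aFold_eq, extract_kmers_encoded_alt, main_inv]
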